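-- pv_equiv track=rewrite | github.com/samhithch-prog/PyStreamlineAI | src/ui/pages/careers/jobs_tab.py | _normalize_location_state_value
-- ===== SOURCE A (Python) =====
-- IT_STRONG_LOCATION_OPTIONS = [
--     "United States of America",
--     "Canada",
--     "United Kingdom",
--     "Germany",
--     "Netherlands",
--     "Ireland",
--     "India",
--     "Singapore",
--     "Australia",
--     "United Arab Emirates",
--     "Switzerland",
--     "Sweden",
--     "Poland",
-- ]
--
-- def _normalize_location_state_value(value: str) -> str:
--     cleaned = " ".join(str(value or "").split()).strip()
--     if not cleaned:
--         return IT_STRONG_LOCATION_OPTIONS[0]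
--     lowered = cleaned.lower()
--     if lowered in {"usa", "us", "u.s.", "united states", "united states of america"}:
--         return "United States of America"
--     if lowered in {"uk", "u.k.", "great britain", "britain"}:
--         return "United Kingdom"
--     if lowered in {"uae", "u.a.e.", "emirates"}:
--         return "United Arab Emirates"
--     for option in IT_STRONG_LOCATION_OPTIONS:
--         if lowered == option.lower():
--             return option
--     return IT_STRONG_LOCATION_OPTIONS[0]
-- ===== SOURCE B (Python) =====
-- IT_STRONG_LOCATION_OPTIONS = [
--     "United States of America",
--     "Canada",
--     "United Kingdom",
--     "Germany",
--     "Netherlands",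
--     "Ireland",
--     "India",
--     "Singapore",
--     "Australia",
--     "United Arab Emirates",
--     "Switzerland",
--     "Sweden",
--     "Poland",
-- ]
--
-- # One flat lookup table: every alias and every lowercased option -> canonical option.
-- _ALIAS_MAP = {
--     "usa": "United States of America",
--     "us": "United States of America",
--     "u.s.": "United States of America",
--     "united states": "United States of America",
--     "united states of america": "United States of America",
--     "uk": "United Kingdom",
--     "u.k.": "United Kingdom",
--     "great britain": "United Kingdom",
--     "britain": "United Kingdom",
--     "united kingdom": "United Kingdom",
--     "uae": "United Arab Emirates",
--     "u.a.e.": "United Arab Emirates",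
--     "emirates": "United Arab Emirates",
--     "united arab emirates": "United Arab Emirates",
--     "canada": "Canada",
--     "germany": "Germany",
--     "netherlands": "Netherlands",
--     "ireland": "Ireland",
--     "india": "India",
--     "singapore": "Singapore",
--     "australia": "Australia",
--     "switzerland": "Switzerland",
--     "sweden": "Sweden",
--     "poland": "Poland",
-- }
--
-- def _normalize_location_state_value(value: str) -> str:
--     cleaned = " ".join(str(value or "").split()).strip()
--     if not cleaned:
--         return IT_STRONG_LOCATION_OPTIONS[0]
--     return _ALIAS_MAP.get(cleaned.lower(), IT_STRONG_LOCATION_OPTIONS[0])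
-- ===== Notes on version B (the rewrite author's own statement) =====
-- stated objective: idiomatic
-- what changed: A's three sequential alias-set membership checks plus a linear scan over the options list are replaced by a single lookup in one precomputed module-level alias->canonical dict covering every alias and every lowercased option.
import Mathlib
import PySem

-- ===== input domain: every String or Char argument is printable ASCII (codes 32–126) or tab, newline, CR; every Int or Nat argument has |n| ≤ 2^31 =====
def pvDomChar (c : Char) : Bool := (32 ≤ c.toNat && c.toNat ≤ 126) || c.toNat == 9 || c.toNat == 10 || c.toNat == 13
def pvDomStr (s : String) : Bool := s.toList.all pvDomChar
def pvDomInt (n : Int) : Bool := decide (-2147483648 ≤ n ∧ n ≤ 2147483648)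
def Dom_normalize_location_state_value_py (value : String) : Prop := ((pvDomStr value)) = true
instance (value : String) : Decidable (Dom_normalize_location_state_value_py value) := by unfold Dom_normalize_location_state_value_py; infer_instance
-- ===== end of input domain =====

-- B replaces A's three membership checks plus the linear option scan by a single lookup in one
-- precomputed alias→canonical table (objective: idiomatic/simpler; same observable behaviour).

-- shared module-level constant IT_STRONG_LOCATION_OPTIONS
def pvOptions : List String :=
  ["United States of America", "Canada", "United Kingdom", "Germany", "Netherlands",
   "Ireland", "India", "Singapore", "Australia", "United Arab Emirates",
   "Switzerland", "Sweden", "Poland"]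

-- ' '.join(str(value or "").split()).strip()  (identical line in both Pythons)
def pvClean (value : String) : String :=
  PySem.Str.strip (PySem.Str.join " " (PySem.Str.split₀ (if value == "" then "" else value)))

-- ===== PORT A =====
-- the 'for option in IT_STRONG_LOCATION_OPTIONS: if lowered == option.lower(): return option' loop
def pvFindOption (lowered : String) : List String → Option String
  | [] => none
  | o :: rest => if lowered == PySem.Str.lower o then some o else pvFindOption lowered rest

def normalize_location_state_value_py (value : String) : String :=
  let cleaned := pvClean value
  if cleaned == "" then PySem.List.pyGetD pvOptions 0 "" else
  let lowered := PySem.Str.lower cleaned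
  if (PySem.Set.ofList ["usa", "us", "u.s.", "united states", "united states of america"]).contains lowered then
    "United States of America"
  else if (PySem.Set.ofList ["uk", "u.k.", "great britain", "britain"]).contains lowered then
    "United Kingdom"
  else if (PySem.Set.ofList ["uae", "u.a.e.", "emirates"]).contains lowered then
    "United Arab Emirates"
  else
    match pvFindOption lowered pvOptions with
    | some o => o
    | none => PySem.List.pyGetD pvOptions 0 ""

-- ===== PORT B =====
-- module-level _ALIAS_MAP: a dict literal with pairwise-distinct keys, i.e. exactly this association list
def pvAliasMap : PySem.Dict String String := PySem.Dict.mk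
  [("usa", "United States of America"),
   ("us", "United States of America"),
   ("u.s.", "United States of America"),
   ("united states", "United States of America"),
   ("united states of america", "United States of America"),
   ("uk", "United Kingdom"),
   ("u.k.", "United Kingdom"),
   ("great britain", "United Kingdom"),
   ("britain", "United Kingdom"),
   ("united kingdom", "United Kingdom"),
   ("uae", "United Arab Emirates"),
   ("u.a.e.", "United Arab Emirates"),
   ("emirates", "United Arab Emirates"),
   ("united arab emirates", "United Arab Emirates"),
   ("canada", "Canada"),
   ("germany", "Germany"),
   ("netherlands", "Netherlands"),
   ("ireland", "Ireland"),
   ("india", "India"),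
   ("singapore", "Singapore"),
   ("australia", "Australia"),
   ("switzerland", "Switzerland"),
   ("sweden", "Sweden"),
   ("poland", "Poland")]

def normalize_location_state_value_py_alt (value : String) : String :=
  let cleaned := pvClean value
  if cleaned == "" then PySem.List.pyGetD pvOptions 0 "" else
  PySem.Dict.getD pvAliasMap (PySem.Str.lower cleaned) (PySem.List.pyGetD pvOptions 0 "")

-- ===== PRECONDITION & SPEC =====
def Spec_normalize_location_state_value_py (value : String) (out : String) : Prop := out = normalize_location_state_value_py_alt value
instance (value : String) (out : String) : Decidable (Spec_normalize_location_state_value_py value out) := by unfold Spec_normalize_location_state_value_py; infer_instance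

-- ===== CLAIM (what is proved, stated in full; the proofs are below) =====
def Claim_equal_normalize_location_state_value_py : Prop := ∀ (value : String), Dom_normalize_location_state_value_py value → Spec_normalize_location_state_value_py value (normalize_location_state_value_py value)

-- ===== LEMMAS AND PROOFS =====

-- A's branch chain on an arbitrary lowered string equals one lookup in the alias table
lemma pv_tail_eq (l : String) :
    (if (PySem.Set.ofList ["usa", "us", "u.s.", "united states", "united states of america"]).contains l then
      "United States of America"
    else if (PySem.Set.ofList ["uk", "u.k.", "great britain", "britain"]).contains l then
      "United Kingdom"
    else if (PySem.Set.ofList ["uae", "u.a.e.", "emirates"]).contains l then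
      "United Arab Emirates"
    else
      match pvFindOption l pvOptions with
      | some o => o
      | none => PySem.List.pyGetD pvOptions 0 "") =
    PySem.Dict.getD pvAliasMap l (PySem.List.pyGetD pvOptions 0 "") := by
  have e0 : PySem.Str.lower "United States of America" = "united states of america" := rfl
  have e1 : PySem.Str.lower "Canada" = "canada" := rfl
  have e2 : PySem.Str.lower "United Kingdom" = "united kingdom" := rfl
  have e3 : PySem.Str.lower "Germany" = "germany" := rfl
  have e4 : PySem.Str.lower "Netherlands" = "netherlands" := rfl
  have e5 : PySem.Str.lower "Ireland" = "ireland" := rfl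
  have e6 : PySem.Str.lower "India" = "india" := rfl
  have e7 : PySem.Str.lower "Singapore" = "singapore" := rfl
  have e8 : PySem.Str.lower "Australia" = "australia" := rfl
  have e9 : PySem.Str.lower "United Arab Emirates" = "united arab emirates" := rfl
  have e10 : PySem.Str.lower "Switzerland" = "switzerland" := rfl
  have e11 : PySem.Str.lower "Sweden" = "sweden" := rfl
  have e12 : PySem.Str.lower "Poland" = "poland" := rfl
  by_cases h0 : l = "usa"
  · subst h0; decide
  by_cases h1 : l = "us"
  · subst h1; decide
  by_cases h2 : l = "u.s."
  · subst h2; decide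
  by_cases h3 : l = "united states"
  · subst h3; decide
  by_cases h4 : l = "united states of america"
  · subst h4; decide
  by_cases h5 : l = "uk"
  · subst h5; decide
  by_cases h6 : l = "u.k."
  · subst h6; decide
  by_cases h7 : l = "great britain"
  · subst h7; decide
  by_cases h8 : l = "britain"
  · subst h8; decide
  by_cases h9 : l = "united kingdom"
  · subst h9; decide
  by_cases h10 : l = "uae"
  · subst h10; decide
  by_cases h11 : l = "u.a.e."
  · subst h11; decide
  by_cases h12 : l = "emirates"
  · subst h12; decide
  by_cases h13 : l = "united arab emirates"
  · subst h13; decide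
  by_cases h14 : l = "canada"
  · subst h14; decide
  by_cases h15 : l = "germany"
  · subst h15; decide
  by_cases h16 : l = "netherlands"
  · subst h16; decide
  by_cases h17 : l = "ireland"
  · subst h17; decide
  by_cases h18 : l = "india"
  · subst h18; decide
  by_cases h19 : l = "singapore"
  · subst h19; decide
  by_cases h20 : l = "australia"
  · subst h20; decide
  by_cases h21 : l = "switzerland"
  · subst h21; decide
  by_cases h22 : l = "sweden"
  · subst h22; decide
  by_cases h23 : l = "poland"
  · subst h23; decide
  have g0 : ¬("usa" = l) := fun h => h0 h.symm
  have g1 : ¬("us" = l) := fun h => h1 h.symm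
  have g2 : ¬("u.s." = l) := fun h => h2 h.symm
  have g3 : ¬("united states" = l) := fun h => h3 h.symm
  have g4 : ¬("united states of america" = l) := fun h => h4 h.symm
  have g5 : ¬("uk" = l) := fun h => h5 h.symm
  have g6 : ¬("u.k." = l) := fun h => h6 h.symm
  have g7 : ¬("great britain" = l) := fun h => h7 h.symm
  have g8 : ¬("britain" = l) := fun h => h8 h.symm
  have g9 : ¬("united kingdom" = l) := fun h => h9 h.symm
  have g10 : ¬("uae" = l) := fun h => h10 h.symm
  have g11 : ¬("u.a.e." = l) := fun h => h11 h.symm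
  have g12 : ¬("emirates" = l) := fun h => h12 h.symm
  have g13 : ¬("united arab emirates" = l) := fun h => h13 h.symm
  have g14 : ¬("canada" = l) := fun h => h14 h.symm
  have g15 : ¬("germany" = l) := fun h => h15 h.symm
  have g16 : ¬("netherlands" = l) := fun h => h16 h.symm
  have g17 : ¬("ireland" = l) := fun h => h17 h.symm
  have g18 : ¬("india" = l) := fun h => h18 h.symm
  have g19 : ¬("singapore" = l) := fun h => h19 h.symm
  have g20 : ¬("australia" = l) := fun h => h20 h.symm
  have g21 : ¬("switzerland" = l) := fun h => h21 h.symm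
  have g22 : ¬("sweden" = l) := fun h => h22 h.symm
  have g23 : ¬("poland" = l) := fun h => h23 h.symm
  simp [PySem.Set.contains, PySem.Dict.getD, pvAliasMap, pvFindOption, pvOptions, e0, e1, e2, e3, e4, e5, e6, e7, e8, e9, e10, e11, e12, PySem.Dict.get?, h0, h1, h2, h3, h4, h5, h6, h7, h8, h9, h10, h11, h12, h13, h14, h15, h16, h17, h18, h19, h20, h21, h22, h23, g0, g1, g2, g3, g4, g5, g6, g7, g8, g9, g10, g11, g12, g13, g14, g15, g16, g17, g18, g19, g20, g21, g22, g23]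

-- ===== VERDICT (by name: the statement is the Claim_ definition above) =====
theorem normalize_location_state_value_py_spec : Claim_equal_normalize_location_state_value_py := by
  intro value _
  unfold Spec_normalize_location_state_value_py normalize_location_state_value_py normalize_location_state_value_py_alt
  by_cases hc : pvClean value == ""
  · simp only [hc, if_pos]
  · simp only [hc, Bool.false_eq_true, if_false]
    exact pv_tail_eq _
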